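-- pv_equiv track=rewrite | github.com/FardadDadboud/vlm | vlm_drift_dataset.py | _apply_annotation_filters
-- ===== SOURCE A (Python) =====
-- from typing import Dict, List, Any, Optional, Tuple
--
-- def _apply_annotation_filters(annotations: List[Dict], filters: Dict) -> List[Dict]:
--     """Apply annotation-level filters"""
--     if not filters:
--         return annotations
--
--     filtered_annotations = []
--     for anno in annotations:
--         include_annotation = True
--         for filter_name, filter_values in filters.items():
--             if filter_name in anno:
--                 if anno[filter_name] not in filter_values:
--                     include_annotation = False
--                     break
--         if include_annotation:
--             filtered_annotations.append(anno)
--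
--     return filtered_annotations
-- ===== SOURCE B (Python) =====
-- from typing import Dict, List, Any, Optional, Tuple
--
-- def _apply_annotation_filters(annotations: List[Dict], filters: Dict) -> List[Dict]:
--     """Apply annotation-level filters as successive whole-list passes."""
--     if not filters:
--         return annotations
--     result = annotations
--     for filter_name, filter_values in filters.items():
--         result = [a for a in result
--                   if filter_name not in a or a[filter_name] in filter_values]
--     return result
-- ===== Notes on version B (the rewrite author's own statement) =====
-- stated objective: alternative
-- what changed: B loops over the filters as the outer loop, rebuilding the annotation list once per filter with a comprehension, instead of A's per-annotation inner loop over all filters with a flag and early break.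
import Mathlib
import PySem

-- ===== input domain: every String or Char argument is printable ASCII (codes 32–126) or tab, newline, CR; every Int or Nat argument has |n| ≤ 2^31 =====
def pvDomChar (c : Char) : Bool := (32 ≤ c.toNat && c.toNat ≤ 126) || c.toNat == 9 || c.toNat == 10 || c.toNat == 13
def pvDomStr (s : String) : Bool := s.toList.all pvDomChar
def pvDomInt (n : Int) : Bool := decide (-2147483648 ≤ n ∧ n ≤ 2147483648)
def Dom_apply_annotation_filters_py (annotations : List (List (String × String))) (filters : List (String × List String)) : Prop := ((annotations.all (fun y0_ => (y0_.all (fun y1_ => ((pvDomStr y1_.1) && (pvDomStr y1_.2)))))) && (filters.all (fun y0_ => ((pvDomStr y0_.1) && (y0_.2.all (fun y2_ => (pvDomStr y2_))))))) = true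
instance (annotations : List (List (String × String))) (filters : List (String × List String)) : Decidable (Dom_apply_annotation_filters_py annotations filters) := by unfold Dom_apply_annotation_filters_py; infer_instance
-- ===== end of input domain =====

-- B applies the filters as successive whole-list passes (outer loop over filters, one
-- comprehension per filter) instead of A's per-annotation flag-and-break inner loop; alternative decomposition, same cost.

-- ===== PORT A =====
-- inner loop of A over the filter items, with the 'include_annotation = False; break' as an early false
def pvCheckA (anno : List (String × String)) : List (String × List String) → Bool
  | [] => true
  | (f, vs) :: rest =>
    match anno.lookup f with          -- 'filter_name in anno' + 'anno[filter_name]' (dict: first match)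
    | none => pvCheckA anno rest
    | some v => if vs.contains v then pvCheckA anno rest else false

def apply_annotation_filters_py (annotations : List (List (String × String))) (filters : List (String × List String)) : List (List (String × String)) :=
  if filters = [] then annotations
  else annotations.foldl (fun acc anno => if pvCheckA anno filters then acc ++ [anno] else acc) []

-- ===== PORT B =====
-- one filter's pass test: 'filter_name not in a or a[filter_name] in filter_values'
def pvPassB (fv : String × List String) (a : List (String × String)) : Bool :=
  match a.lookup fv.1 with
  | none => true
  | some v => fv.2.contains v

def apply_annotation_filters_py_alt (annotations : List (List (String × String))) (filters : List (String × List String)) : List (List (String × String)) :=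
  if filters = [] then annotations
  else filters.foldl (fun res fv => res.filter (pvPassB fv)) annotations

-- ===== PRECONDITION & SPEC =====
def Spec_apply_annotation_filters_py (annotations : List (List (String × String))) (filters : List (String × List String)) (out : List (List (String × String))) : Prop := out = apply_annotation_filters_py_alt annotations filters
instance (annotations : List (List (String × String))) (filters : List (String × List String)) (out : List (List (String × String))) : Decidable (Spec_apply_annotation_filters_py annotations filters out) := by unfold Spec_apply_annotation_filters_py; infer_instance

-- ===== CLAIM (what is proved, stated in full; the proofs are below) =====
def Claim_equal_apply_annotation_filters_py : Prop := ∀ (annotations : List (List (String × String))) (filters : List (String × List String)), Dom_apply_annotation_filters_py annotations filters → Spec_apply_annotation_filters_py annotations filters (apply_annotation_filters_py annotations filters)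

-- ===== LEMMAS AND PROOFS =====

-- A's inner break loop answers 'every filter passes'
theorem pvCheckA_eq_all (anno : List (String × String)) (fs : List (String × List String)) :
    pvCheckA anno fs = fs.all (fun fv => pvPassB fv anno) := by
  induction fs with
  | nil => rfl
  | cons fv rest ih =>
    obtain ⟨f, vs⟩ := fv
    simp only [pvCheckA, List.all_cons]
    cases h : anno.lookup f <;> simp [pvPassB, h, ih]

-- B's successive filter passes compute the filter by the conjunction of all passes
theorem foldl_filter_eq (fs : List (String × List String)) (xs : List (List (String × String))) :
    fs.foldl (fun res fv => res.filter (pvPassB fv)) xs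
      = xs.filter (fun a => fs.all (fun fv => pvPassB fv a)) := by
  induction fs generalizing xs with
  | nil => simp
  | cons fv rest ih =>
    simp only [List.foldl_cons, ih, List.filter_filter, List.all_cons]
    exact List.filter_congr (fun a _ => Bool.and_comm _ _)

-- ===== VERDICT (by name: the statement is the Claim_ definition above) =====
theorem apply_annotation_filters_py_spec : Claim_equal_apply_annotation_filters_py := by
  intro annotations filters _
  unfold Spec_apply_annotation_filters_py apply_annotation_filters_py apply_annotation_filters_py_alt
  by_cases h : filters = []
  · simp [h]
  · simp only [if_neg h, foldl_filter_eq]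
    rw [PySem.List.foldl_append_if]
    simp [pvCheckA_eq_all]
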